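-- pv_equiv track=rewrite | github.com/slalit360/scalar_practice | DSA/Array/class_2_prefix_sum/special_index.py | get_special_index_count
-- ===== SOURCE A (Python) =====
-- def get_special_index_count(A):
--     # generate PSE and PSO
--
--     n = len(A)
--     PSO = [0] * n
--     PSE = [0] * n
--
--     PSE[0] = A[0]
--     PSO[0] = 0
--     for i in range(1, n):
--         if i % 2 == 0:
--             PSE[i] = PSE[i - 1] + A[i]
--             PSO[i] = PSO[i - 1]
--         else:
--             PSE[i] = PSE[i - 1]
--             PSO[i] = PSO[i - 1] + A[i]
--
--     # PSO[0] = 0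
--     # for i in range(1, n):
--     #     if i % 2 == 1:
--     #         PSO[i] = PSO[i - 1] + A[i]
--     #     else:
--     #         PSO[i] = PSO[i - 1]
--
--     count_indices = 0
--     for i in range(0, n):
--         even_sum = PSE[i - 1] + (PSO[n - 1] - PSO[i])
--         odd_sum = PSO[i - 1] + (PSE[n - 1] - PSE[i])
--
--         if even_sum == odd_sum:
--             count_indices += 1
--
--     return count_indices
-- ===== SOURCE B (Python) =====
-- def get_special_index_count(A):
--     # Reduce to a single alternating sum: removing index i balances the parities iff
--     # D(i) + D(i+1) == T, where D(k) = sum_{j<k} (-1)**j * A[j] and T = D(len(A)),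
--     # i.e. 2*D(i) + sign_i*A[i] == T.  One signed accumulator, no parity bookkeeping.
--     total = sum(x if i % 2 == 0 else -x for i, x in enumerate(A))
--     count = 0
--     d = 0
--     sign = 1
--     for x in A:
--         if 2 * d + sign * x == total:
--             count += 1
--         d += sign * x
--         sign = -sign
--     return count
-- ===== Notes on version B (the rewrite author's own statement) =====
-- stated objective: alternative
-- what changed: B discards A's two prefix-sum arrays and the even/odd bookkeeping entirely: it reduces the test to alternating sums, computing T = sum of (-1)^i*A[i] and then a single signed accumulator d with the algebraic test 2*d + sign*x == T per index.
-- intended difference: On nonempty lists where exactly one of 'the first element is zero' and 'the even-index sum minus the odd-index sum equals the first element' holds, A counts index 0 iff the first element is zero (its PSE and PSO at index -1 wrap around to the totals), while B counts it iff removing the first element balances the even and odd sums, which is the intended special-index test. — e.g. on get_special_index_count([1]): A returns 0, B returns 1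
import Mathlib
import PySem

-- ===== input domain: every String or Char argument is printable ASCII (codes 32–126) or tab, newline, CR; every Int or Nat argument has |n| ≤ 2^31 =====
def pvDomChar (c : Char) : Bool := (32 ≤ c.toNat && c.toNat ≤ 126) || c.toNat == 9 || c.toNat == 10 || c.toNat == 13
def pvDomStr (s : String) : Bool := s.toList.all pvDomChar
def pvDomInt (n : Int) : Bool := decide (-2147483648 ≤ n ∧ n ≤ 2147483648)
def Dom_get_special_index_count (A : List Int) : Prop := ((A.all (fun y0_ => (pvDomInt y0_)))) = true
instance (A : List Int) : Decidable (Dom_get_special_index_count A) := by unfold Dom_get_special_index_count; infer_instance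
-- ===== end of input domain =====

-- B replaces A's two prefix-sum arrays and per-index reconstruction by a reduction to a single
-- alternating sum: index i is special iff 2*D(i) + sign_i*A[i] = T with D(k) = Σ_{j<k} (-1)^j A[j]
-- (objective: alternative). At index 0 A's negative-index wraparound makes it count that index iff
-- the first element is zero; B uses the intended test there (see D_ below).


-- ===== PORT A =====
-- body of A's first loop (builds PSE, PSO; kept as the filled prefix of the Python arrays)
def pvBuildStep (A : List Int) (ps : List Int × List Int) (i : Int) : List Int × List Int :=
  if PySem.Int.mod i 2 == 0 then
    (ps.1 ++ [PySem.List.pyGetD ps.1 (i - 1) 0 + PySem.List.pyGetD A i 0],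
     ps.2 ++ [PySem.List.pyGetD ps.2 (i - 1) 0])
  else
    (ps.1 ++ [PySem.List.pyGetD ps.1 (i - 1) 0],
     ps.2 ++ [PySem.List.pyGetD ps.2 (i - 1) 0 + PySem.List.pyGetD A i 0])

-- body of A's second loop
def pvCountStep (pse pso : List Int) (n : Int) (count : Int) (i : Int) : Int :=
  let even_sum := PySem.List.pyGetD pse (i - 1) 0 + (PySem.List.pyGetD pso (n - 1) 0 - PySem.List.pyGetD pso i 0)
  let odd_sum := PySem.List.pyGetD pso (i - 1) 0 + (PySem.List.pyGetD pse (n - 1) 0 - PySem.List.pyGetD pse i 0)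
  if even_sum == odd_sum then count + 1 else count

def get_special_index_count (A : List Int) : Int :=
  let n : Int := A.length
  let ps := (PySem.List.pyRange 1 n 1).foldl (pvBuildStep A)
      ([PySem.List.pyGetD A 0 0], [(0 : Int)])
  (PySem.List.pyRange 0 n 1).foldl (pvCountStep ps.1 ps.2 n) 0

-- ===== PORT B =====
-- B's alternating total:  sum(x if i % 2 == 0 else -x for i, x in enumerate(A))
def pvAltTotStep (t : Int) (p : Int × Int) : Int :=
  t + (if PySem.Int.mod p.1 2 == 0 then p.2 else -p.2)

-- B's loop body; state = (count, d, sign)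
def pvAltScanStep (total : Int) (st : Int × Int × Int) (x : Int) : Int × Int × Int :=
  ((if 2 * st.2.1 + st.2.2 * x == total then st.1 + 1 else st.1),
   st.2.1 + st.2.2 * x, -st.2.2)

def get_special_index_count_alt (A : List Int) : Int :=
  let total := (PySem.List.enumerate A 0).foldl pvAltTotStep 0
  (A.foldl (pvAltScanStep total) (0, 0, 1)).1

-- ===== PRECONDITION & SPEC =====
-- Pre_ excludes only the empty list, on which A raises IndexError (A[0]).
def Pre_get_special_index_count (A : List Int) : Prop := A ≠ []
instance (A : List Int) : Decidable (Pre_get_special_index_count A) := by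
  unfold Pre_get_special_index_count; infer_instance
def pvWitness_get_special_index_count : List Int := [1, 2]

-- On nonempty A where exactly one of 'the first element is zero' and 'the even-index sum minus the
-- odd-index sum (the alternating sum, A.foldr (· - ·) 0) equals the first element' holds, A counts index 0 iff the first element is zero (its
-- PSE and PSO at index -1 wrap around to the totals) while B counts it iff removing the first
-- element balances the even and odd sums, which is the intended special-index test.
def D_get_special_index_count (A : List Int) : Prop :=
  A ≠ [] ∧ ¬ ((A.headD 0 = 0) ↔ (A.foldr (fun a s => a - s) 0 = A.headD 0))
instance (A : List Int) : Decidable (D_get_special_index_count A) := by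
  unfold D_get_special_index_count; infer_instance

def Spec_get_special_index_count (A : List Int) (out : Int) : Prop :=
  ¬ D_get_special_index_count A → out = get_special_index_count_alt A
instance (A : List Int) (out : Int) : Decidable (Spec_get_special_index_count A out) := by
  unfold Spec_get_special_index_count; infer_instance

def pvDiffWitness_get_special_index_count : List Int := [1]
def pvDiffWitnessOut_get_special_index_count : Int × Int := (0, 1)

-- ===== CLAIM (what is proved, stated in full; the proofs are below) =====
def Claim_unchanged_get_special_index_count : Prop := ∀ (A : List Int), Dom_get_special_index_count A → Pre_get_special_index_count A → Spec_get_special_index_count A (get_special_index_count A)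
def Claim_changed_get_special_index_count : Prop := Dom_get_special_index_count (pvDiffWitness_get_special_index_count) ∧ Pre_get_special_index_count (pvDiffWitness_get_special_index_count) ∧ D_get_special_index_count (pvDiffWitness_get_special_index_count) ∧ get_special_index_count (pvDiffWitness_get_special_index_count) = pvDiffWitnessOut_get_special_index_count.1 ∧ get_special_index_count_alt (pvDiffWitness_get_special_index_count) = pvDiffWitnessOut_get_special_index_count.2 ∧ pvDiffWitnessOut_get_special_index_count.1 ≠ pvDiffWitnessOut_get_special_index_count.2
def Claim_exact_get_special_index_count : Prop := ∀ (A : List Int), Dom_get_special_index_count A → Pre_get_special_index_count A → D_get_special_index_count A → get_special_index_count A ≠ get_special_index_count_alt A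

-- ===== LEMMAS AND PROOFS =====

-- prefix sums of A at even / odd positions among the first k indices
def sE (A : List Int) : Nat → Int
  | 0 => 0
  | k + 1 => sE A k + (if k % 2 = 0 then A.getD k 0 else 0)

def sO (A : List Int) : Nat → Int
  | 0 => 0
  | k + 1 => sO A k + (if k % 2 = 0 then 0 else A.getD k 0)

-- the intended (B's) per-index test, with n = A.length
def cB (A : List Int) (k : Nat) : Bool :=
  decide (sE A k + (sO A A.length - sO A (k + 1)) = sO A k + (sE A A.length - sE A (k + 1)))

-- count of f over the indices [k, k+l)
def cntFrom (f : Nat → Bool) : Nat → Nat → Int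
  | _, 0 => 0
  | k, l + 1 => (if f k then 1 else 0) + cntFrom f (k + 1) l

-- the sign (-1)^k carried by B's scan
def pvSgn (k : Nat) : Int := if k % 2 = 0 then 1 else -1

lemma pvMod2 (k : Nat) : (PySem.Int.mod (k:Int) 2 == 0) = decide (k % 2 = 0) := by
  rw [show ((2:Int)) = ((2:Nat):Int) from rfl, PySem.Int.mod_natCast]
  cases Nat.mod_two_eq_zero_or_one k <;> simp [*]

lemma pvGetDMapRange (f : Nat → Int) (n k : Nat) (h : k < n) :
    ((List.range n).map f).getD k 0 = f k := by
  simp [List.getD, h]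

lemma pvShift (a : Int) (t : List Int) : ∀ k : Nat,
    sE (a :: t) (k + 1) = a + sO t k ∧ sO (a :: t) (k + 1) = sE t k := by
  intro k
  induction k with
  | zero => simp [sE, sO]
  | succ k ih =>
    obtain ⟨ih1, ih2⟩ := ih
    constructor
    · show sE (a :: t) (k + 1 + 1) = _
      rw [sE, ih1, sO]
      rcases Nat.mod_two_eq_zero_or_one k with h | h <;>
        simp [Nat.succ_mod_two_eq_zero_iff, h] <;> ring
    · show sO (a :: t) (k + 1 + 1) = _
      rw [sO, ih2, sE]
      rcases Nat.mod_two_eq_zero_or_one k with h | h <;>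
        simp [Nat.succ_mod_two_eq_zero_iff, h]

lemma pvFoldrAlt (A : List Int) : A.foldr (fun a s => a - s) 0 = sE A A.length - sO A A.length := by
  induction A with
  | nil => simp [sE, sO]
  | cons a t ih =>
    obtain ⟨h1, h2⟩ := pvShift a t t.length
    simp only [List.foldr_cons, ih, List.length_cons, h1, h2]
    ring

lemma pvDropGetD (A : List Int) (k : Nat) (x : Int) (t : List Int) (h : A.drop k = x :: t) :
    A.getD k 0 = x ∧ A.drop (k + 1) = t := by
  constructor
  · have h0 : A[k]? = some x := by
      have h' := congrArg (fun l => l[0]?) h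
      simpa [List.getElem?_drop] using h'
    simp [List.getD, h0]
  · have ht : (A.drop k).tail = A.drop (k + 1) := by
      rw [List.tail_drop]
    rw [← ht, h]
    rfl

lemma pvSgnSucc (k : Nat) : pvSgn (k + 1) = -pvSgn k := by
  unfold pvSgn
  rcases Nat.mod_two_eq_zero_or_one k with h | h <;>
    simp [Nat.succ_mod_two_eq_zero_iff, h]

-- D(k+1) = D(k) + sgn k * A[k]
lemma pvDSucc (A : List Int) (k : Nat) :
    sE A (k + 1) - sO A (k + 1) = (sE A k - sO A k) + pvSgn k * A.getD k 0 := by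
  rw [sE, sO]
  unfold pvSgn
  rcases Nat.mod_two_eq_zero_or_one k with h | h <;> simp [h] <;> ring

-- B's per-step test coincides with the intended test cB
lemma pvTestEq (A : List Int) (k : Nat) :
    (2 * (sE A k - sO A k) + pvSgn k * A.getD k 0 == sE A A.length - sO A A.length)
      = cB A k := by
  unfold cB
  have h := pvDSucc A k
  rw [Bool.eq_iff_iff]
  simp only [beq_iff_eq, decide_eq_true_eq]
  unfold pvSgn at h ⊢
  rcases Nat.mod_two_eq_zero_or_one k with hk | hk <;> simp only [hk] at h ⊢ <;> simp at h ⊢ <;> omega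

-- B's totals pass: the alternating sum equals sE - sO
lemma pvTotInv (A : List Int) : ∀ (t : List Int) (k : Nat), A.drop k = t → k ≤ A.length →
    (PySem.List.enumerate t (k : Int)).foldl pvAltTotStep (sE A k - sO A k)
      = sE A A.length - sO A A.length := by
  intro t
  induction t with
  | nil =>
    intro k hd hk
    have : A.length ≤ k := List.drop_eq_nil_iff.mp hd
    have hk' : k = A.length := by omega
    subst hk'
    rfl
  | cons x t' ih =>
    intro k hd hk
    obtain ⟨hx, ht⟩ := pvDropGetD A k x t' hd
    have hklt : k < A.length := by
      by_contra hc
      rw [List.drop_eq_nil_iff.mpr (by omega)] at hd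
      simp at hd
    rw [PySem.List.enumerate_cons, List.foldl_cons]
    have hstep : pvAltTotStep (sE A k - sO A k) ((k : Int), x) = sE A (k + 1) - sO A (k + 1) := by
      unfold pvAltTotStep
      rw [pvMod2 k, pvDSucc A k, hx]
      unfold pvSgn
      rcases Nat.mod_two_eq_zero_or_one k with h | h <;> simp [h] <;> ring
    rw [hstep, show ((k : Int) + 1) = ((k + 1 : Nat) : Int) by push_cast; ring]
    exact ih (k + 1) ht (by omega)

-- B's scan pass
lemma pvScanInv (A : List Int) : ∀ (t : List Int) (k : Nat) (c : Int), A.drop k = t → k ≤ A.length →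
    t.foldl (pvAltScanStep (sE A A.length - sO A A.length)) (c, sE A k - sO A k, pvSgn k)
      = (c + cntFrom (cB A) k (A.length - k), sE A A.length - sO A A.length, pvSgn A.length) := by
  intro t
  induction t with
  | nil =>
    intro k c hd hk
    have : A.length ≤ k := List.drop_eq_nil_iff.mp hd
    have hk' : k = A.length := by omega
    subst hk'
    simp [cntFrom]
  | cons x t' ih =>
    intro k c hd hk
    obtain ⟨hx, ht⟩ := pvDropGetD A k x t' hd
    have hklt : k < A.length := by
      by_contra hc
      rw [List.drop_eq_nil_iff.mpr (by omega)] at hd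
      simp at hd
    rw [List.foldl_cons]
    have hstep : pvAltScanStep (sE A A.length - sO A A.length) (c, sE A k - sO A k, pvSgn k) x
        = (if cB A k then c + 1 else c, sE A (k + 1) - sO A (k + 1), pvSgn (k + 1)) := by
      unfold pvAltScanStep
      rw [show (2 * (sE A k - sO A k) + pvSgn k * x == sE A A.length - sO A A.length)
            = cB A k by rw [← hx, pvTestEq],
        pvSgnSucc]
      rw [Prod.mk.injEq, Prod.mk.injEq]
      refine ⟨rfl, ?_, rfl⟩
      rw [pvDSucc A k, hx]
    rw [hstep, ih (k + 1) (if cB A k then c + 1 else c) ht (by omega)]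
    have hl : A.length - k = (A.length - (k + 1)) + 1 := by omega
    rw [hl]
    show _ = (c + ((if cB A k then (1:Int) else 0) + cntFrom (cB A) (k + 1) (A.length - (k + 1))), _, _)
    by_cases hc : cB A k <;> simp [hc] <;> ring_nf

lemma pvAltEq (A : List Int) :
    get_special_index_count_alt A = cntFrom (cB A) 0 A.length := by
  have htot := pvTotInv A A 0 rfl (by omega)
  have hscan := pvScanInv A A 0 0 rfl (by omega)
  simp only [Nat.cast_zero] at htot
  rw [show sE A 0 - sO A 0 = 0 from rfl] at htot
  rw [show sE A 0 - sO A 0 = 0 from rfl, show pvSgn 0 = 1 from rfl, zero_add] at hscan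
  simp only [Nat.sub_zero] at hscan
  show (A.foldl (pvAltScanStep ((PySem.List.enumerate A 0).foldl pvAltTotStep 0)) (0, 0, 1)).1 = _
  rw [htot, hscan]

-- A's build loop
lemma pvBuildInv (A : List Int) : ∀ (m : Nat), 1 ≤ m →
    (PySem.List.pyRange 1 (m : Int) 1).foldl (pvBuildStep A) ([A.getD 0 0], [(0:Int)])
      = ((List.range m).map (fun i => sE A (i+1)), (List.range m).map (fun i => sO A (i+1))) := by
  intro m hm
  induction m, hm using Nat.le_induction with
  | base =>
    rw [show ((1 : Nat) : Int) = 1 by norm_num, PySem.List.pyRange_one_eq_nil le_rfl]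
    simp [sE, sO]
  | succ m hm ih =>
    rw [show ((m + 1 : Nat) : Int) = (m : Int) + 1 by push_cast; ring,
      PySem.List.pyRange_one_succ_right (a := 1) (b := (m : Int)) (by exact_mod_cast hm),
      List.foldl_append, ih, List.foldl_cons, List.foldl_nil]
    unfold pvBuildStep
    rw [pvMod2 m, show ((m : Int) - 1) = ((m - 1 : Nat) : Int) by omega]
    simp only [PySem.List.pyGetD_natCast]
    rw [pvGetDMapRange _ m (m - 1) (by omega), pvGetDMapRange _ m (m - 1) (by omega)]
    rw [show m - 1 + 1 = m from by omega]
    rcases Nat.mod_two_eq_zero_or_one m with h | h <;>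
      simp [h, List.range_succ, sE, sO, List.getD]

-- A's count loop, indices ≥ 1
lemma pvCountInv (A : List Int) : ∀ (l k : Nat) (c : Int), 1 ≤ k → k + l = A.length →
    (PySem.List.pyRange (k : Int) (A.length : Int) 1).foldl
      (pvCountStep ((List.range A.length).map (fun i => sE A (i+1)))
                   ((List.range A.length).map (fun i => sO A (i+1))) (A.length : Int)) c
      = c + cntFrom (cB A) k l := by
  intro l
  induction l with
  | zero =>
    intro k c h1 h2
    rw [show ((A.length : Nat) : Int) = (k : Int) by omega, PySem.List.pyRange_one_eq_nil (by omega)]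
    simp [cntFrom]
  | succ l ih =>
    intro k c h1 h2
    rw [PySem.List.pyRange_one_cons (by omega : (k : Int) < (A.length : Int)), List.foldl_cons]
    have hstep : pvCountStep ((List.range A.length).map (fun i => sE A (i+1)))
        ((List.range A.length).map (fun i => sO A (i+1))) (A.length : Int) c (k : Int)
        = if cB A k then c + 1 else c := by
      unfold pvCountStep
      rw [show ((k : Int) - 1) = ((k - 1 : Nat) : Int) by omega,
        show ((A.length : Nat) : Int) - 1 = ((A.length - 1 : Nat) : Int) by omega]
      simp only [PySem.List.pyGetD_natCast]
      rw [pvGetDMapRange _ A.length (k - 1) (by omega), pvGetDMapRange _ A.length (k - 1) (by omega),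
        pvGetDMapRange _ A.length (A.length - 1) (by omega), pvGetDMapRange _ A.length (A.length - 1) (by omega),
        pvGetDMapRange _ A.length k (by omega), pvGetDMapRange _ A.length k (by omega)]
      rw [show k - 1 + 1 = k from by omega, show A.length - 1 + 1 = A.length from by omega]
      simp [cB, beq_iff_eq]
    rw [hstep, show ((k : Int) + 1) = ((k + 1 : Nat) : Int) by push_cast; ring,
      ih (k + 1) (if cB A k then c + 1 else c) (by omega) (by omega)]
    show _ = c + ((if cB A k then (1:Int) else 0) + cntFrom (cB A) (k + 1) l)
    by_cases hc : cB A k <;> simp [hc] <;> ring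

lemma pvAEq (A : List Int) (h : A ≠ []) :
    get_special_index_count A
      = (if A.getD 0 0 = 0 then 1 else 0) + cntFrom (cB A) 1 (A.length - 1) := by
  have hn : 1 ≤ A.length := List.length_pos_of_ne_nil h
  have hb := pvBuildInv A A.length hn
  show (PySem.List.pyRange 0 (A.length : Int) 1).foldl
      (pvCountStep ((PySem.List.pyRange 1 (A.length : Int) 1).foldl (pvBuildStep A)
          ([PySem.List.pyGetD A 0 0], [(0:Int)])).1
        ((PySem.List.pyRange 1 (A.length : Int) 1).foldl (pvBuildStep A)
          ([PySem.List.pyGetD A 0 0], [(0:Int)])).2 (A.length : Int)) 0 = _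
  rw [show PySem.List.pyGetD A 0 0 = A.getD 0 0 from PySem.List.pyGetD_zero A 0]
  rw [hb]
  rw [PySem.List.pyRange_one_cons (by exact_mod_cast hn : (0:Int) < (A.length : Int)), List.foldl_cons]
  have hstep : pvCountStep ((List.range A.length).map (fun i => sE A (i+1)))
      ((List.range A.length).map (fun i => sO A (i+1))) (A.length : Int) 0 0
      = (if A.getD 0 0 = 0 then 1 else 0) := by
    unfold pvCountStep
    have hlen1 : ((List.range A.length).map (fun i => sE A (i+1))).length = A.length := by simp
    have hlen2 : ((List.range A.length).map (fun i => sO A (i+1))).length = A.length := by simp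
    rw [show ((0:Int) - 1) = -(1:Int) by ring]
    rw [PySem.List.pyGetD_neg_ofNat _ 1 0 (by omega) (by simpa [hlen1] using hn)]
    rw [PySem.List.pyGetD_neg_ofNat _ 1 0 (by omega) (by simpa [hlen2] using hn)]
    rw [show ((A.length : Nat) : Int) - 1 = ((A.length - 1 : Nat) : Int) by omega]
    simp only [PySem.List.pyGetD_natCast, PySem.List.pyGetD_zero]
    rw [pvGetDMapRange _ A.length (A.length - 1) (by omega), pvGetDMapRange _ A.length (A.length - 1) (by omega),
      pvGetDMapRange _ A.length 0 (by omega), pvGetDMapRange _ A.length 0 (by omega)]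
    rw [show A.length - 1 + 1 = A.length from by omega]
    simp only [hlen1, hlen2, List.getElem_map, List.getElem_range]
    rw [show A.length - 1 + 1 = A.length from by omega]
    have h1 : sE A 1 = A.getD 0 0 := by simp [sE]
    have h0 : sO A 1 = 0 := by simp [sO]
    rw [show (0:Nat) + 1 = 1 from rfl, h1, h0]
    simp only [beq_iff_eq]
    by_cases hg : A.getD 0 0 = 0
    · rw [if_pos (by omega), if_pos hg]
      norm_num
    · rw [if_neg (by omega), if_neg hg]
  rw [hstep, show ((0:Int) + 1) = ((1 : Nat) : Int) by norm_num]
  rw [pvCountInv A (A.length - 1) 1 _ le_rfl (by omega)]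

lemma pvCB0 (A : List Int) :
    cB A 0 = decide (sE A A.length - sO A A.length = A.getD 0 0) := by
  have h1 : sE A 1 = A.getD 0 0 := by simp [sE]
  have h0 : sO A 1 = 0 := by simp [sO]
  unfold cB
  rw [show (0:Nat) + 1 = 1 from rfl, h1, h0]
  apply decide_eq_decide.mpr
  constructor <;> intro <;> simp [sE, sO] at * <;> omega

lemma pvHeadD (A : List Int) (h : A ≠ []) : A.headD 0 = A.getD 0 0 := by
  cases A with
  | nil => simp at h
  | cons a t => rfl

lemma pvSplit0 (A : List Int) (h : 1 ≤ A.length) :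
    cntFrom (cB A) 0 A.length = (if cB A 0 then (1:Int) else 0) + cntFrom (cB A) 1 (A.length - 1) := by
  obtain ⟨l, hl⟩ : ∃ l, A.length = l + 1 := ⟨A.length - 1, by omega⟩
  rw [hl]
  simp [cntFrom]

lemma pvIffD (A : List Int) (hpre : A ≠ []) :
    (¬ D_get_special_index_count A) ↔ ((A.getD 0 0 = 0) ↔ (sE A A.length - sO A A.length = A.getD 0 0)) := by
  unfold D_get_special_index_count
  rw [pvFoldrAlt, pvHeadD A hpre]
  simp [hpre]

-- ===== VERDICT =====
theorem get_special_index_count_spec : Claim_unchanged_get_special_index_count := by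
  intro A _ hpre hnd
  show get_special_index_count A = get_special_index_count_alt A
  have hn : 1 ≤ A.length := List.length_pos_of_ne_nil hpre
  rw [pvAEq A hpre, pvAltEq A, pvSplit0 A hn, pvCB0]
  have hiff := (pvIffD A hpre).mp hnd
  by_cases hg : A.getD 0 0 = 0
  · rw [if_pos hg, if_pos (by simpa using hiff.mp hg)]
  · rw [if_neg hg, if_neg (by simpa using fun hc => hg (hiff.mpr hc))]

theorem get_special_index_count_changed : Claim_changed_get_special_index_count := by
  unfold Claim_changed_get_special_index_count; decide

theorem get_special_index_count_tight : Claim_exact_get_special_index_count := by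
  intro A _ hpre hd
  have hn : 1 ≤ A.length := List.length_pos_of_ne_nil hpre
  rw [pvAEq A hpre, pvAltEq A, pvSplit0 A hn, pvCB0]
  have hne : ¬ ((A.getD 0 0 = 0) ↔ (sE A A.length - sO A A.length = A.getD 0 0)) :=
    fun hiff => ((pvIffD A hpre).mpr hiff) hd
  by_cases hg : A.getD 0 0 = 0
  · have h2 : ¬ (sE A A.length - sO A A.length = A.getD 0 0) :=
      fun hc => hne ⟨fun _ => hc, fun _ => hg⟩
    rw [if_pos hg, if_neg (by simpa using h2)]
    omega
  · have h2 : sE A A.length - sO A A.length = A.getD 0 0 := by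
      by_contra hq
      exact hne (iff_of_false hg hq)
    rw [if_neg hg, if_pos (by simpa using h2)]
    omega
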